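-- pv_equiv track=rewrite | github.com/jenilpatel252525-cyber/python-practice | 231.py | maxProfit_2D_optimized
-- ===== SOURCE A (Python) =====
-- def maxProfit_2D_optimized(prices, fee):
--     n = len(prices)
--     dp = [[0] * n for _ in range(n)]
--
--     for length in range(1, n):  # interval length
--         for i in range(n - length):
--             j = i + length
--
--             # option 1: don't sell at j
--             profit1 = dp[i][j-1]
--
--             # option 2: direct buy at i, sell at j
--             profit2 = max(0, prices[j] - prices[i] - fee)
--
--             # option 3: split at (j-1)
--             profit3 = dp[i][j-2] + dp[j-1][j] if j-1 > i else 0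
--
--             dp[i][j] = max(profit1, profit2, profit3)
--
--     return dp[0][n-1]
-- ===== SOURCE B (Python) =====
-- def maxProfit_2D_optimized(prices, fee):
--     # Only row 0 of the interval DP is needed: e[j] recurses on e[j-1], e[j-2]
--     # and the single-pair profit of (j-1, j).  O(n) time, O(1) space.
--     prev2 = prev = 0  # e[j-2], e[j-1]
--     for j in range(1, len(prices)):
--         cur = max(prev, prices[j] - prices[0] - fee, 0)
--         if j >= 2:
--             cur = max(cur, prev2 + max(0, prices[j] - prices[j-1] - fee))
--         prev2, prev = prev, cur
--     return prev
-- ===== Notes on version B (the rewrite author's own statement) =====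
-- stated objective: faster
-- what changed: Replaces the O(n^2) interval DP over all pairs (i,j) with a single O(n) left-to-right pass computing only row 0 of the table, since dp[0][j] depends only on dp[0][j-1], dp[0][j-2] and the one-pair profit of (j-1, j).
import Mathlib
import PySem

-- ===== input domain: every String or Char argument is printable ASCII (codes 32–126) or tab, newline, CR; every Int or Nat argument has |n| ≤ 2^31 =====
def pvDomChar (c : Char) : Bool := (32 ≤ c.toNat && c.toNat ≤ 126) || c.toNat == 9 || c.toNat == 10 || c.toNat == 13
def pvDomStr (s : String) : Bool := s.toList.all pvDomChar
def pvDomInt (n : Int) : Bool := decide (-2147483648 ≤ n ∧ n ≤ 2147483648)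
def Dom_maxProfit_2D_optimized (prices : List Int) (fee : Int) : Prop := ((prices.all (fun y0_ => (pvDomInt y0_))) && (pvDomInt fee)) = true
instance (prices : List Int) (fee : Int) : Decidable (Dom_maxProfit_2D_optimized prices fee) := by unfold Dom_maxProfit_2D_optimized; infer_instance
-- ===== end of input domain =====

-- B replaces A's O(n^2) interval DP (all intervals [i,j]) by the O(n) recursion of row 0 only:
-- e[j] = max(e[j-1], prices[j]-prices[0]-fee, 0, e[j-2] + max(0, prices[j]-prices[j-1]-fee)).
-- Return-value equivalence is proved on Pre_ (non-empty prices; Python A raises IndexError on []).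

-- ===== PORT A =====
-- dp is the n×n zero table as List (List Int); every table/prices access A performs is at an
-- in-range non-negative index, so getD with default is exact there (proved via the loop bounds).
def maxProfit_2D_optimized (prices : List Int) (fee : Int) : Int :=
  let n := prices.length
  let dp0 : List (List Int) := List.replicate n (List.replicate n (0 : Int))
  let dp := (List.range' 1 (n - 1)).foldl (fun dp length =>
    (List.range (n - length)).foldl (fun dp i =>
      let j := i + length
      let profit1 := (dp.getD i []).getD (j - 1) 0
      let profit2 := max 0 (prices.getD j 0 - prices.getD i 0 - fee)
      let profit3 := if i < j - 1 then (dp.getD i []).getD (j - 2) 0 + (dp.getD (j - 1) []).getD j 0 else 0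
      dp.set i ((dp.getD i []).set j (max profit1 (max profit2 profit3)))
    ) dp
  ) dp0
  (dp.getD 0 []).getD (n - 1) 0

-- ===== PORT B =====
-- state = (e[j-2], e[j-1]); all prices accesses are in range for j ∈ [1, n)
def maxProfit_2D_optimized_alt (prices : List Int) (fee : Int) : Int :=
  ((List.range' 1 (prices.length - 1)).foldl (fun (st : Int × Int) j =>
    let cur := max st.2 (max (prices.getD j 0 - prices.getD 0 0 - fee) 0)
    let cur2 := if 2 ≤ j then max cur (st.1 + max 0 (prices.getD j 0 - prices.getD (j - 1) 0 - fee)) else cur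
    (st.2, cur2)) ((0 : Int), (0 : Int))).2

-- ===== PRECONDITION & SPEC =====
-- Pre_ excludes only the empty list, on which Python A raises IndexError (dp[0] on an empty dp).
def Pre_maxProfit_2D_optimized (prices : List Int) (fee : Int) : Prop := prices ≠ []
instance (prices : List Int) (fee : Int) : Decidable (Pre_maxProfit_2D_optimized prices fee) := by unfold Pre_maxProfit_2D_optimized; infer_instance
def pvWitness_maxProfit_2D_optimized : List Int × Int := ([1, 5, 3, 8], 2)

def Spec_maxProfit_2D_optimized (prices : List Int) (fee : Int) (out : Int) : Prop := out = maxProfit_2D_optimized_alt prices fee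
instance (prices : List Int) (fee : Int) (out : Int) : Decidable (Spec_maxProfit_2D_optimized prices fee out) := by unfold Spec_maxProfit_2D_optimized; infer_instance

-- ===== CLAIM (what is proved, stated in full; the proofs are below) =====
def Claim_equal_maxProfit_2D_optimized : Prop := ∀ (prices : List Int) (fee : Int), Dom_maxProfit_2D_optimized prices fee → Pre_maxProfit_2D_optimized prices fee → Spec_maxProfit_2D_optimized prices fee (maxProfit_2D_optimized prices fee)

-- ===== LEMMAS AND PROOFS =====

-- the interval-DP value dp[i][j], as a recursive function
def pvF (p : List Int) (fee : Int) (i j : Nat) : Int :=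
  if _h : j ≤ i then 0
  else
    max (pvF p fee i (j - 1))
      (max (max 0 (p.getD j 0 - p.getD i 0 - fee))
        (if _h2 : i < j - 1 then pvF p fee i (j - 2) + pvF p fee (j - 1) j else 0))
termination_by j - i
decreasing_by all_goals omega

lemma pvF_le (p : List Int) (fee : Int) (i j : Nat) (h : j ≤ i) : pvF p fee i j = 0 := by
  rw [pvF]; simp [h]

lemma pvF_adj (p : List Int) (fee : Int) (j : Nat) (h : 1 ≤ j) :
    pvF p fee (j - 1) j = max 0 (p.getD j 0 - p.getD (j - 1) 0 - fee) := by
  rw [pvF]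
  rw [dif_neg (show ¬ j ≤ j - 1 by omega), dif_neg (show ¬ j - 1 < j - 1 by omega),
    pvF_le p fee (j - 1) (j - 1) (le_refl _)]
  omega

-- named copies of A's loop bodies (definitionally the lambdas in the port)
def aInner (p : List Int) (fee : Int) (length : Nat) (dp : List (List Int)) (i : Nat) : List (List Int) :=
  let j := i + length
  let profit1 := (dp.getD i []).getD (j - 1) 0
  let profit2 := max 0 (p.getD j 0 - p.getD i 0 - fee)
  let profit3 := if i < j - 1 then (dp.getD i []).getD (j - 2) 0 + (dp.getD (j - 1) []).getD j 0 else 0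
  dp.set i ((dp.getD i []).set j (max profit1 (max profit2 profit3)))

def aOuter (p : List Int) (fee : Int) (dp : List (List Int)) (length : Nat) : List (List Int) :=
  (List.range (p.length - length)).foldl (aInner p fee length) dp

lemma a_eq (p : List Int) (fee : Int) :
    maxProfit_2D_optimized p fee
      = ((((List.range' 1 (p.length - 1)).foldl (aOuter p fee)
          (List.replicate p.length (List.replicate p.length (0 : Int)))).getD 0 []).getD (p.length - 1) 0) := rfl

-- cell (i, j) of the table, as Python's dp[i][j] (in-range reads only)
def gdp (dp : List (List Int)) (i j : Nat) : Int := (dp.getD i []).getD j 0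

-- the table stays an n×n matrix
def Shape (n : Nat) (dp : List (List Int)) : Prop := dp.length = n ∧ ∀ r ∈ dp, r.length = n

lemma pv_getD_set {α : Type} (l : List α) (i j : Nat) (a d : α) :
    (l.set i a).getD j d = if j = i ∧ i < l.length then a else l.getD j d := by
  by_cases h : j = i
  · subst h
    by_cases h2 : j < l.length
    · rw [if_pos ⟨rfl, h2⟩]
      unfold List.getD
      rw [List.getElem?_set_eq_of_lt a h2]
      rfl
    · rw [if_neg (by tauto), List.set_eq_of_length_le (by omega)]
  · rw [if_neg (by tauto)]
    unfold List.getD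
    rw [List.getElem?_set_ne (by omega)]

lemma shape_row {n : Nat} {dp : List (List Int)} (hs : Shape n dp) (i : Nat) (hi : i < n) :
    (dp.getD i []).length = n := by
  have hlt : i < dp.length := by rw [hs.1]; exact hi
  have hget : dp[i]? = some dp[i] := List.getElem?_eq_getElem hlt
  have hmem : dp[i] ∈ dp := List.getElem_mem hlt
  unfold List.getD
  rw [hget]
  exact hs.2 _ hmem

lemma gdp_update {n : Nat} {dp : List (List Int)} (hs : Shape n dp) (i j : Nat)
    (hi : i < n) (hj : j < n) (v : Int) (a b : Nat) :
    gdp (dp.set i ((dp.getD i []).set j v)) a b = if a = i ∧ b = j then v else gdp dp a b := by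
  unfold gdp
  rw [pv_getD_set (d := [])]
  by_cases ha : a = i
  · subst ha
    rw [if_pos ⟨rfl, by rw [hs.1]; exact hi⟩, pv_getD_set (d := (0 : Int))]
    rw [shape_row hs a hi]
    by_cases hb : b = j
    · rw [if_pos ⟨hb, hj⟩, if_pos ⟨rfl, hb⟩]
    · rw [if_neg (by tauto), if_neg (by tauto)]
  · rw [if_neg (by tauto), if_neg (by tauto)]

lemma shape_update {n : Nat} {dp : List (List Int)} (hs : Shape n dp) (i j : Nat)
    (hi : i < n) (v : Int) :
    Shape n (dp.set i ((dp.getD i []).set j v)) := by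
  refine ⟨by rw [List.length_set]; exact hs.1, ?_⟩
  intro r hr
  rcases List.mem_or_eq_of_mem_set hr with h | h
  · exact hs.2 r h
  · rw [h, List.length_set]
    exact shape_row hs i hi

lemma shape_init (n : Nat) : Shape n (List.replicate n (List.replicate n (0 : Int))) := by
  refine ⟨List.length_replicate, ?_⟩
  intro r hr
  rw [List.eq_of_mem_replicate hr]
  exact List.length_replicate

lemma gdp_init (n : Nat) (i j : Nat) : gdp (List.replicate n (List.replicate n (0 : Int))) i j = 0 := by
  unfold gdp
  by_cases hi : i < n
  · rw [List.getD_replicate (x := List.replicate n (0 : Int)) hi]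
    by_cases hj : j < n
    · exact List.getD_replicate (x := (0 : Int)) hj
    · exact List.getD_eq_default _ _ (by rw [List.length_replicate]; omega)
  · have h1 : (List.replicate n (List.replicate n (0 : Int))).getD i [] = [] :=
      List.getD_eq_default _ _ (by rw [List.length_replicate]; omega)
    rw [h1]
    rfl

-- the value A writes into cell (s, s+L) equals pvF there
lemma inner_cell (p : List Int) (fee : Int) (L : Nat) (hL : 1 ≤ L) (s : Nat)
    (hsn : s + L < p.length) (dp : List (List Int))
    (hdp : ∀ i j, gdp dp i j = if i < j ∧ j < p.length ∧ (j - i < L ∨ (j - i = L ∧ i < s)) then pvF p fee i j else 0) :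
    max (gdp dp s (s + L - 1))
      (max (max 0 (p.getD (s + L) 0 - p.getD s 0 - fee))
        (if s < s + L - 1 then gdp dp s (s + L - 2) + gdp dp (s + L - 1) (s + L) else 0))
      = pvF p fee s (s + L) := by
  have e1 : gdp dp s (s + L - 1) = pvF p fee s (s + L - 1) := by
    rcases Nat.lt_or_ge L 2 with h2 | h2
    · have hL1 : L = 1 := by omega
      subst hL1
      rw [hdp, if_neg (by omega), pvF_le p fee s (s + 1 - 1) (by omega)]
    · rw [hdp, if_pos ⟨by omega, by omega, Or.inl (by omega)⟩]
  rw [pvF]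
  rw [dif_neg (show ¬ s + L ≤ s by omega), e1]
  congr 1
  congr 1
  by_cases h3 : s < s + L - 1
  · rw [if_pos h3, dif_pos h3]
    have e2 : gdp dp s (s + L - 2) = pvF p fee s (s + L - 2) := by
      rcases Nat.lt_or_ge L 3 with h4 | h4
      · have hL2 : L = 2 := by omega
        subst hL2
        rw [hdp, if_neg (by omega), pvF_le p fee s (s + 2 - 2) (by omega)]
      · rw [hdp, if_pos ⟨by omega, by omega, Or.inl (by omega)⟩]
    have e3 : gdp dp (s + L - 1) (s + L) = pvF p fee (s + L - 1) (s + L) := by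
      rw [hdp, if_pos ⟨by omega, hsn, Or.inl (by omega)⟩]
    rw [e2, e3]
  · rw [if_neg h3, dif_neg h3]

lemma inner_inv (p : List Int) (fee : Int) (L : Nat) (hL : 1 ≤ L) :
    ∀ (cnt s : Nat) (dp : List (List Int)),
      s + cnt ≤ p.length - L →
      Shape p.length dp →
      (∀ i j, gdp dp i j = if i < j ∧ j < p.length ∧ (j - i < L ∨ (j - i = L ∧ i < s)) then pvF p fee i j else 0) →
      Shape p.length (List.foldl (aInner p fee L) dp (List.range' s cnt)) ∧
      ∀ i j, gdp (List.foldl (aInner p fee L) dp (List.range' s cnt)) i j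
        = if i < j ∧ j < p.length ∧ (j - i < L ∨ (j - i = L ∧ i < s + cnt)) then pvF p fee i j else 0 := by
  intro cnt
  induction cnt with
  | zero => intro s dp _ hsh hdp; exact ⟨hsh, by intro i j; simpa using hdp i j⟩
  | succ c ih =>
    intro s dp hb hsh hdp
    rw [List.range'_succ, List.foldl_cons]
    have hsn : s + L < p.length := by
      have h1 : 1 ≤ p.length - L := by omega
      omega
    have hstep : aInner p fee L dp s
        = dp.set s ((dp.getD s []).set (s + L)
            (max (gdp dp s (s + L - 1))
              (max (max 0 (p.getD (s + L) 0 - p.getD s 0 - fee))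
                (if s < s + L - 1 then gdp dp s (s + L - 2) + gdp dp (s + L - 1) (s + L) else 0)))) := rfl
    have hsh' : Shape p.length (aInner p fee L dp s) := by
      rw [hstep]; exact shape_update hsh s (s + L) (by omega) _
    have key : ∀ a b, gdp (aInner p fee L dp s) a b
        = if a < b ∧ b < p.length ∧ (b - a < L ∨ (b - a = L ∧ a < s + 1)) then pvF p fee a b else 0 := by
      intro a b
      rw [hstep, gdp_update hsh s (s + L) (by omega) hsn _ a b]
      by_cases hab : a = s ∧ b = s + L
      · rw [if_pos hab, hab.1, hab.2,
          if_pos (show s < s + L ∧ s + L < p.length ∧ (s + L - s < L ∨ (s + L - s = L ∧ s < s + 1)) from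
            ⟨by omega, hsn, Or.inr ⟨by omega, by omega⟩⟩)]
        exact inner_cell p fee L hL s hsn dp hdp
      · rw [if_neg hab, hdp a b]
        have hiff : (a < b ∧ b < p.length ∧ (b - a < L ∨ (b - a = L ∧ a < s))) ↔
            (a < b ∧ b < p.length ∧ (b - a < L ∨ (b - a = L ∧ a < s + 1))) := by omega
        simp only [hiff]
    obtain ⟨hsh2, hres⟩ := ih (s + 1) (aInner p fee L dp s) (by omega) hsh' key
    refine ⟨hsh2, ?_⟩
    intro i j
    rw [hres i j]
    have hiff : (i < j ∧ j < p.length ∧ (j - i < L ∨ (j - i = L ∧ i < s + 1 + c))) ↔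
        (i < j ∧ j < p.length ∧ (j - i < L ∨ (j - i = L ∧ i < s + (c + 1)))) := by omega
    simp only [hiff]

lemma outer_inv (p : List Int) (fee : Int) :
    ∀ (cnt L : Nat) (dp : List (List Int)), 1 ≤ L →
      Shape p.length dp →
      (∀ i j, gdp dp i j = if i < j ∧ j < p.length ∧ j - i ≤ L - 1 then pvF p fee i j else 0) →
      Shape p.length (List.foldl (aOuter p fee) dp (List.range' L cnt)) ∧
      ∀ i j, gdp (List.foldl (aOuter p fee) dp (List.range' L cnt)) i j
        = if i < j ∧ j < p.length ∧ j - i ≤ L - 1 + cnt then pvF p fee i j else 0 := by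
  intro cnt
  induction cnt with
  | zero => intro L dp _ hsh hdp; exact ⟨hsh, by intro i j; simpa using hdp i j⟩
  | succ c ih =>
    intro L dp hL hsh hdp
    rw [List.range'_succ, List.foldl_cons]
    have h0 : ∀ i j, gdp dp i j
        = if i < j ∧ j < p.length ∧ (j - i < L ∨ (j - i = L ∧ i < 0)) then pvF p fee i j else 0 := by
      intro i j
      rw [hdp i j]
      have hiff : (i < j ∧ j < p.length ∧ j - i ≤ L - 1) ↔
          (i < j ∧ j < p.length ∧ (j - i < L ∨ (j - i = L ∧ i < 0))) := by omega
      simp only [hiff]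
    have hin := inner_inv p fee L hL (p.length - L) 0 dp (by omega) hsh h0
    have hsh' : Shape p.length (aOuter p fee dp L) := by
      unfold aOuter; rw [List.range_eq_range']; exact hin.1
    have key : ∀ a b, gdp (aOuter p fee dp L) a b
        = if a < b ∧ b < p.length ∧ b - a ≤ (L + 1) - 1 then pvF p fee a b else 0 := by
      intro a b
      unfold aOuter
      rw [List.range_eq_range', hin.2 a b]
      have hiff : (a < b ∧ b < p.length ∧ (b - a < L ∨ (b - a = L ∧ a < 0 + (p.length - L)))) ↔
          (a < b ∧ b < p.length ∧ b - a ≤ (L + 1) - 1) := by omega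
      simp only [hiff]
    obtain ⟨hsh2, hres⟩ := ih (L + 1) (aOuter p fee dp L) (by omega) hsh' key
    refine ⟨hsh2, ?_⟩
    intro i j
    rw [hres i j]
    have hiff : (i < j ∧ j < p.length ∧ j - i ≤ (L + 1) - 1 + c) ↔
        (i < j ∧ j < p.length ∧ j - i ≤ L - 1 + (c + 1)) := by omega
    simp only [hiff]

lemma a_char (p : List Int) (fee : Int) :
    maxProfit_2D_optimized p fee = pvF p fee 0 (p.length - 1) := by
  rw [a_eq]
  have h0 : ∀ i j, gdp (List.replicate p.length (List.replicate p.length (0 : Int))) i j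
      = if i < j ∧ j < p.length ∧ j - i ≤ 1 - 1 then pvF p fee i j else 0 := by
    intro i j
    rw [gdp_init, if_neg (by omega)]
  have h := (outer_inv p fee (p.length - 1) 1 _ (le_refl 1) (shape_init p.length) h0).2 0 (p.length - 1)
  rw [show (((List.range' 1 (p.length - 1)).foldl (aOuter p fee)
      (List.replicate p.length (List.replicate p.length (0 : Int)))).getD 0 []).getD (p.length - 1) 0
    = gdp ((List.range' 1 (p.length - 1)).foldl (aOuter p fee)
      (List.replicate p.length (List.replicate p.length (0 : Int)))) 0 (p.length - 1) from rfl, h]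
  by_cases h2 : 2 ≤ p.length
  · rw [if_pos ⟨by omega, by omega, by omega⟩]
  · rw [if_neg (by omega), pvF_le p fee 0 (p.length - 1) (by omega)]

-- B's loop body, named (definitionally the lambda in the port)
def bStep (p : List Int) (fee : Int) (st : Int × Int) (j : Nat) : Int × Int :=
  let cur := max st.2 (max (p.getD j 0 - p.getD 0 0 - fee) 0)
  let cur2 := if 2 ≤ j then max cur (st.1 + max 0 (p.getD j 0 - p.getD (j - 1) 0 - fee)) else cur
  (st.2, cur2)

lemma b_eq (p : List Int) (fee : Int) :
    maxProfit_2D_optimized_alt p fee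
      = ((List.range' 1 (p.length - 1)).foldl (bStep p fee) ((0 : Int), (0 : Int))).2 := rfl

lemma b_step (p : List Int) (fee : Int) (j : Nat) :
    bStep p fee (pvF p fee 0 (j - 1), pvF p fee 0 j) (j + 1) = (pvF p fee 0 j, pvF p fee 0 (j + 1)) := by
  have hadj : pvF p fee j (j + 1) = max 0 (p.getD (j + 1) 0 - p.getD j 0 - fee) := by
    have h := pvF_adj p fee (j + 1) (by omega)
    simpa using h
  have hF : pvF p fee 0 (j + 1)
      = max (pvF p fee 0 j) (max (max 0 (p.getD (j + 1) 0 - p.getD 0 0 - fee))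
          (if 0 < j then pvF p fee 0 (j - 1) + pvF p fee j (j + 1) else 0)) := by
    conv_lhs => rw [pvF]
    rw [dif_neg (show ¬ j + 1 ≤ 0 by omega)]
    simp only [Nat.add_sub_cancel]
    rw [show j + 1 - 2 = j - 1 from by omega]
    by_cases h : 0 < j
    · rw [dif_pos h, if_pos h]
    · rw [dif_neg h, if_neg h]
  simp only [bStep]
  rw [Prod.mk.injEq]
  refine ⟨rfl, ?_⟩
  simp only [Nat.add_sub_cancel]
  by_cases hj : 1 ≤ j
  · rw [if_pos (show 2 ≤ j + 1 by omega), hF]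
    rw [if_pos (show 0 < j by omega), hadj]
    omega
  · have hj0 : j = 0 := by omega
    subst hj0
    rw [if_neg (by omega), hF, if_neg (by omega), pvF_le p fee 0 0 (le_refl _)]
    omega

lemma b_inv (p : List Int) (fee : Int) :
    ∀ (cnt j : Nat),
      (List.range' (j + 1) cnt).foldl (bStep p fee) (pvF p fee 0 (j - 1), pvF p fee 0 j)
        = (pvF p fee 0 (j + cnt - 1), pvF p fee 0 (j + cnt)) := by
  intro cnt
  induction cnt with
  | zero => intro j; simp
  | succ c ih =>
    intro j
    rw [List.range'_succ, List.foldl_cons, b_step p fee j]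
    have e : pvF p fee 0 j = pvF p fee 0 ((j + 1) - 1) := by norm_num
    rw [e, ih (j + 1)]
    congr 2 <;> omega

lemma b_char (p : List Int) (fee : Int) :
    maxProfit_2D_optimized_alt p fee = pvF p fee 0 (p.length - 1) := by
  rw [b_eq]
  have h0 : ((0 : Int), (0 : Int)) = (pvF p fee 0 (0 - 1), pvF p fee 0 0) := by
    simp [pvF_le]
  rw [h0]
  have h := b_inv p fee (p.length - 1) 0
  simp only [Nat.zero_add] at h ⊢
  rw [h]

-- ===== VERDICT (by name: the statement is the Claim_ definition above) =====
theorem maxProfit_2D_optimized_spec : Claim_equal_maxProfit_2D_optimized := by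
  intro prices fee _ _
  unfold Spec_maxProfit_2D_optimized
  rw [a_char, b_char]
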